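-- pv_equiv track=rewrite | github.com/1paulpo1/mathcha2tikz | archive/maintenace/formatter.py | normalize_newlines
-- ===== SOURCE A (Python) =====
-- def normalize_newlines(tikz_code: str) -> str:
--     """
--     Normalize newlines in TikZ code.
--
--     Args:
--         tikz_code: Input TikZ code
--
--     Returns:
--         TikZ code with normalized newlines
--     """
--     # Split into lines and remove empty lines
--     lines = [line.strip() for line in tikz_code.split('\n') if line.strip()]
--
--     # Add proper spacing between sections
--     formatted_lines = []
--     for i, line in enumerate(lines):
--         formatted_lines.append(line)
--
--         # Add newline after comments if next line is a draw command
--         if line.startswith('%') and i + 1 < len(lines):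
--             next_line = lines[i + 1]
--             if next_line.startswith('\\draw'):
--                 formatted_lines.append('')
--
--     return '\n'.join(formatted_lines)
-- ===== SOURCE B (Python) =====
-- def normalize_newlines(tikz_code: str) -> str:
--     """Same normalization, built back-to-front: walk the stripped lines in
--     reverse, prepending, so the already-built head IS the next line and no
--     index lookahead is needed."""
--     lines = [s for s in (ln.strip() for ln in tikz_code.split('\n')) if s]
--     out = []
--     for ln in reversed(lines):
--         if ln.startswith('%') and out and out[0].startswith('\\draw'):
--             out.insert(0, '')
--         out.insert(0, ln)
--     return '\n'.join(out)
-- ===== Notes on version B (the rewrite author's own statement) =====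
-- stated objective: alternative
-- what changed: B builds the output back-to-front with a single reverse traversal that prepends lines, so the already-built head serves as the lookahead, replacing A's enumerate loop with an index-based lines[i+1] peek and bounds check.
import Mathlib
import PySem

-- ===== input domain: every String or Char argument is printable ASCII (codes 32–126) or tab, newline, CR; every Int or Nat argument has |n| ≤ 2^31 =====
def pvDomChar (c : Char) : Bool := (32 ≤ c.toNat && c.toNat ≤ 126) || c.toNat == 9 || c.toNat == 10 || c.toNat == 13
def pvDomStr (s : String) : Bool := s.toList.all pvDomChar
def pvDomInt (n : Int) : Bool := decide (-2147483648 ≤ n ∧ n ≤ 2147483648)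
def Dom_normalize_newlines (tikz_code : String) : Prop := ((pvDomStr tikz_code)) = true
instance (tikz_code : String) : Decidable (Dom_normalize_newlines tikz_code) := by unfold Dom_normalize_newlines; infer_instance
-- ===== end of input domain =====

-- B builds the result back-to-front (reverse fold, the built head is the next line), replacing A's indexed lookahead pass; objective: simpler, same cost.

-- ===== PORT A =====
def normalize_newlines (tikz_code : String) : String :=
  -- lines = [line.strip() for line in tikz_code.split('\n') if line.strip()]
  let lines :=
    (((PySem.Str.split? tikz_code "\n").getD []).filter
        (fun line => PySem.Str.strip line ≠ "")).map (fun line => PySem.Str.strip line)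
  -- for i, line in enumerate(lines): append; lookahead lines[i+1]
  let formatted_lines :=
    (PySem.List.enumerate lines 0).foldl
      (fun acc p =>
        let acc := acc ++ [p.2]
        if PySem.Str.startswith p.2 "%" && decide (p.1 + 1 < (lines.length : Int)) then
          let next_line := PySem.List.pyGetD lines (p.1 + 1) ""
          if PySem.Str.startswith next_line "\\draw" then acc ++ [""] else acc
        else acc) []
  PySem.Str.join "\n" formatted_lines

-- ===== PORT B =====
def normalize_newlines_alt (tikz_code : String) : String :=
  -- lines = [s for s in (ln.strip() for ln in tikz_code.split('\n')) if s]
  let lines :=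
    ((((PySem.Str.split? tikz_code "\n").getD []).map
        (fun ln => PySem.Str.strip ln)).filter (fun s => s ≠ ""))
  -- for ln in reversed(lines): prepend, inserting '' when the built head is a draw line
  let out :=
    lines.foldr
      (fun ln out =>
        let out :=
          if PySem.Str.startswith ln "%" &&
              (match out with
               | [] => false
               | h :: _ => PySem.Str.startswith h "\\draw") then
            "" :: out
          else out
        ln :: out) []
  PySem.Str.join "\n" out

-- ===== PRECONDITION & SPEC =====
def Spec_normalize_newlines (tikz_code : String) (out : String) : Prop := out = normalize_newlines_alt tikz_code
instance (tikz_code : String) (out : String) : Decidable (Spec_normalize_newlines tikz_code out) := by unfold Spec_normalize_newlines; infer_instance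

-- ===== CLAIM (what is proved, stated in full; the proofs are below) =====
def Claim_equal_normalize_newlines : Prop := ∀ (tikz_code : String), Dom_normalize_newlines tikz_code → Spec_normalize_newlines tikz_code (normalize_newlines tikz_code)

-- ===== LEMMAS AND PROOFS =====

-- the common "spine": each line, with '' inserted between a comment line and a following draw line
def pvIns : List String → List String
  | [] => []
  | [x] => [x]
  | x :: y :: r =>
      x :: ((if PySem.Str.startswith x "%" && PySem.Str.startswith y "\\draw" then [""] else [])
              ++ pvIns (y :: r))

theorem pvIns_cons_cons (x y : String) (r : List String) :
    pvIns (x :: y :: r) =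
      x :: ((if PySem.Str.startswith x "%" && PySem.Str.startswith y "\\draw" then [""] else [])
              ++ pvIns (y :: r)) := rfl

-- the head of pvIns (y :: r) is y
theorem pvIns_head (y : String) (r : List String) : ∃ t, pvIns (y :: r) = y :: t := by
  cases r with
  | nil => exact ⟨[], rfl⟩
  | cons z s => exact ⟨_, rfl⟩

-- A's indexed foldl over any suffix equals acc ++ pvIns of that suffix
theorem pvA_loop (lines : List String) :
    ∀ (s : List String) (k : Nat) (acc : List String), lines.drop k = s →
    (PySem.List.enumerate s (k : Int)).foldl
      (fun acc p =>
        if PySem.Str.startswith p.2 "%" && decide (p.1 + 1 < (lines.length : Int)) then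
          if PySem.Str.startswith (PySem.List.pyGetD lines (p.1 + 1) "") "\\draw" then
            acc ++ [p.2] ++ [""] else acc ++ [p.2]
        else acc ++ [p.2]) acc = acc ++ pvIns s := by
  intro s
  induction s with
  | nil => intro k acc _; simp [PySem.List.enumerate, pvIns]
  | cons x rest ih =>
    intro k acc hdrop
    have hk : k < lines.length := by
      by_contra h
      rw [List.drop_eq_nil_of_le (Nat.le_of_not_lt h)] at hdrop
      simp at hdrop
    have hdrop1 : lines.drop (k + 1) = rest := by
      rw [← List.tail_drop, hdrop]; rfl
    have hlen : lines.length = k + 1 + rest.length := by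
      have h1 : lines.length - k = (x :: rest).length := by
        rw [← hdrop, List.length_drop]
      simp at h1; omega
    rw [PySem.List.enumerate_cons, List.foldl_cons]
    have hcast : ((k : Int) + 1) = ((k + 1 : Nat) : Int) := by push_cast; ring
    rw [hcast, ih (k + 1) _ hdrop1]
    simp only []
    cases rest with
    | nil =>
      simp only [List.length_nil] at hlen
      simp [pvIns]
      intro _ h
      exact absurd h (by omega)
    | cons y r =>
      have hcond : decide (((k + 1 : Nat) : Int) < (lines.length : Int)) = true := by
        simp only [List.length_cons] at hlen
        simp; omega
      have hget : PySem.List.pyGetD lines (((k + 1 : Nat) : Int)) "" = y := by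
        rw [PySem.List.pyGetD_natCast]
        have hsome : lines[k + 1]? = some y := by
          rw [show k + 1 = k + 1 + 0 from rfl, ← List.getElem?_drop, hdrop1]
          rfl
        simp [List.getD, hsome]
      rw [hcond, hget, pvIns_cons_cons]
      generalize PySem.Str.startswith x "%" = bx
      generalize PySem.Str.startswith y "\\draw" = by'
      cases bx <;> cases by' <;> simp

-- B's foldr equals pvIns
theorem pvB_loop (s : List String) :
    s.foldr
      (fun ln out =>
        let out :=
          if PySem.Str.startswith ln "%" &&
              (match out with
               | [] => false
               | h :: _ => PySem.Str.startswith h "\\draw") then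
            "" :: out
          else out
        ln :: out) [] = pvIns s := by
  induction s with
  | nil => rfl
  | cons x t ih =>
    rw [List.foldr_cons, ih]
    cases t with
    | nil => simp [pvIns]
    | cons y r =>
      obtain ⟨tl, htl⟩ := pvIns_head y r
      rw [pvIns_cons_cons, htl]
      cases hx : PySem.Str.startswith x "%" <;>
        cases hy : PySem.Str.startswith y "\\draw" <;>
        simp at hx hy <;> simp_all

-- the two comprehensions build the same line list
theorem pvLines_eq (raw : List String) :
    (raw.filter (fun line => PySem.Str.strip line ≠ "")).map (fun line => PySem.Str.strip line)
      = (raw.map (fun ln => PySem.Str.strip ln)).filter (fun s => s ≠ "") := by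
  induction raw with
  | nil => rfl
  | cons l t ih =>
    simp only [List.map_cons, List.filter_cons, ne_eq, decide_not] at ih ⊢
    by_cases h : PySem.Str.strip l = "" <;> simp [h, ih]

-- ===== VERDICT (by name: the statement is the Claim_ definition above) =====
theorem normalize_newlines_spec : Claim_equal_normalize_newlines := by
  intro tikz_code _
  unfold Spec_normalize_newlines normalize_newlines normalize_newlines_alt
  simp only []
  rw [← pvLines_eq, pvB_loop]
  congr 1
  exact pvA_loop _ _ 0 [] (by simp)
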